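-- pv_equiv track=rewrite | github.com/Farbodtabaei/CodingGame_Hackathon | codingame_gym/tests/test_reset_consistency.py | convert_cli_actions_to_gym
-- ===== SOURCE A (Python) =====
-- def convert_cli_actions_to_gym(cli_actions_list):
--     """
--     Convert list of CLI action dicts to gym format List[List[List[str]]].
--     Returns max_turns and the formatted actions array.
--     """
--     # Find max turns across all games
--     max_turns = 0
--     for actions in cli_actions_list:
--         p0_len = len(actions['0'])
--         p1_len = len(actions['1'])
--         max_turns = max(max_turns, min(p0_len, p1_len))
--
--     gym_actions_per_turn = []
--
--     for turn in range(max_turns):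
--         turn_actions = []
--         for game_idx, actions in enumerate(cli_actions_list):
--             # Get actions for this turn if available, else WAIT
--             p0_acts = ['WAIT']
--             p1_acts = ['WAIT']
--
--             if turn < len(actions['0']):
--                 lines = [l for l in actions['0'][turn].split('\n') if l.strip()]
--                 if lines: p0_acts = lines
--
--             if turn < len(actions['1']):
--                 lines = [l for l in actions['1'][turn].split('\n') if l.strip()]
--                 if lines: p1_acts = lines
--
--             turn_actions.append([p0_acts, p1_acts])
--         gym_actions_per_turn.append(turn_actions)
--
--     return max_turns, gym_actions_per_turn
-- ===== SOURCE B (Python) =====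
-- def convert_cli_actions_to_gym(cli_actions_list):
--     """
--     Convert list of CLI action dicts to gym format List[List[List[str]]].
--     Returns max_turns and the formatted actions array.
--     """
--     max_turns = 0
--     for actions in cli_actions_list:
--         max_turns = max(max_turns, min(len(actions['0']), len(actions['1'])))
--
--     def acts(turns, turn):
--         if turn < len(turns):
--             lines = [l for l in turns[turn].split('\n') if l.strip()]
--             if lines:
--                 return lines
--         return ['WAIT']
--
--     # game-major table: one row per game, one entry per turn
--     rows = [[[acts(actions['0'], t), acts(actions['1'], t)] for t in range(max_turns)]
--             for actions in cli_actions_list]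
--     # transpose to turn-major (list comprehension keeps lists, not tuples)
--     return max_turns, [[row[t] for row in rows] for t in range(max_turns)]
-- ===== Notes on version B (the rewrite author's own statement) =====
-- stated objective: alternative
-- what changed: B builds a game-major table (one row per game via a shared per-entry helper) and then transposes it into the turn-major result, instead of A's turn-major nested loops with mutable per-entry defaults.
import Mathlib
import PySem

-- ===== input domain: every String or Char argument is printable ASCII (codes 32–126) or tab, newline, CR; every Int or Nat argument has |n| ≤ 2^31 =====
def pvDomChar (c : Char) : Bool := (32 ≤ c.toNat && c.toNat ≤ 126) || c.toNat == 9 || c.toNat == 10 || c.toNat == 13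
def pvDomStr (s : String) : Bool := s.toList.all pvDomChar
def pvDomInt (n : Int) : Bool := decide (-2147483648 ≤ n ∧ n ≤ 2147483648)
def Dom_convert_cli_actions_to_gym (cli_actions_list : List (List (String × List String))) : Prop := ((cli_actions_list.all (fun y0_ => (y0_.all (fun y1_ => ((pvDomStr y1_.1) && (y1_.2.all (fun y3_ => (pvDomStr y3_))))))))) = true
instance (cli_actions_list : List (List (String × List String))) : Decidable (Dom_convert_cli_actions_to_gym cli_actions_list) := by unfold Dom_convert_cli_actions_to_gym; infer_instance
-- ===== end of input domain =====

-- B builds a game-major table and transposes it, instead of A's turn-major nested loops; same cost (objective: alternative).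

-- ===== PORT A =====
-- nonempty-after-strip lines of s.split('\n') (exact: PySem.Str.split?/strip; split? is some since the separator is nonempty on the ASCII domain)
def pvLinesA (s : String) : List String :=
  ((PySem.Str.split? s "\n").getD []).filter (fun l => decide (PySem.Str.strip l ≠ ""))

def convert_cli_actions_to_gym (cli_actions_list : List (List (String × List String))) : Int × List (List (List (List String))) :=
  let max_turns : Nat := cli_actions_list.foldl (fun m actions =>
    max m (min (PySem.Dict.getD (PySem.Dict.mk actions) "0" []).length (PySem.Dict.getD (PySem.Dict.mk actions) "1" []).length)) 0
  let gym_actions_per_turn : List (List (List (List String))) :=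
    (List.range max_turns).map (fun turn =>
      cli_actions_list.map (fun actions =>
        let p0_acts := ["WAIT"]
        let p1_acts := ["WAIT"]
        let p0_acts :=
          if turn < (PySem.Dict.getD (PySem.Dict.mk actions) "0" []).length then
            let lines := pvLinesA ((PySem.Dict.getD (PySem.Dict.mk actions) "0" []).getD turn "")
            if lines ≠ [] then lines else p0_acts
          else p0_acts
        let p1_acts :=
          if turn < (PySem.Dict.getD (PySem.Dict.mk actions) "1" []).length then
            let lines := pvLinesA ((PySem.Dict.getD (PySem.Dict.mk actions) "1" []).getD turn "")
            if lines ≠ [] then lines else p1_acts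
          else p1_acts
        [p0_acts, p1_acts]))
  ((max_turns : Int), gym_actions_per_turn)

-- ===== PORT B =====
-- helper acts(turns, turn) of Source B: entry for one player at one turn
def pvActsB (ts : List String) (turn : Nat) : List String :=
  if turn < ts.length then
    let lines := ((PySem.Str.split? (ts.getD turn "") "\n").getD []).filter (fun l => decide (PySem.Str.strip l ≠ ""))
    if lines ≠ [] then lines else ["WAIT"]
  else ["WAIT"]

def convert_cli_actions_to_gym_alt (cli_actions_list : List (List (String × List String))) : Int × List (List (List (List String))) :=
  let max_turns : Nat := cli_actions_list.foldl (fun m actions =>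
    max m (min (PySem.Dict.getD (PySem.Dict.mk actions) "0" []).length (PySem.Dict.getD (PySem.Dict.mk actions) "1" []).length)) 0
  let rows : List (List (List (List String))) :=
    cli_actions_list.map (fun actions =>
      (List.range max_turns).map (fun t =>
        [pvActsB (PySem.Dict.getD (PySem.Dict.mk actions) "0" []) t, pvActsB (PySem.Dict.getD (PySem.Dict.mk actions) "1" []) t]))
  ((max_turns : Int), (List.range max_turns).map (fun t => rows.map (fun row => row.getD t [])))

-- ===== PRECONDITION & SPEC =====
-- Pre_: every game dict has keys '0' and '1' — exactly where the Python A (and B) returns instead of raising KeyError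
def Pre_convert_cli_actions_to_gym (cli_actions_list : List (List (String × List String))) : Prop :=
  ∀ actions ∈ cli_actions_list, (PySem.Dict.get? (PySem.Dict.mk actions) "0").isSome ∧ (PySem.Dict.get? (PySem.Dict.mk actions) "1").isSome
instance (cli_actions_list : List (List (String × List String))) : Decidable (Pre_convert_cli_actions_to_gym cli_actions_list) := by unfold Pre_convert_cli_actions_to_gym; infer_instance

def pvWitness_convert_cli_actions_to_gym : (List (List (String × List String))) :=
  [[("0", ["MOVE 1\n \nWAIT"]), ("1", [""])], [("0", []), ("1", ["X"])]]

def Spec_convert_cli_actions_to_gym (cli_actions_list : List (List (String × List String))) (out : Int × List (List (List (List String)))) : Prop := out = convert_cli_actions_to_gym_alt cli_actions_list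
instance (cli_actions_list : List (List (String × List String))) (out : Int × List (List (List (List String)))) : Decidable (Spec_convert_cli_actions_to_gym cli_actions_list out) := by unfold Spec_convert_cli_actions_to_gym; infer_instance

-- ===== CLAIM (what is proved, stated in full; the proofs are below) =====
def Claim_equal_convert_cli_actions_to_gym : Prop := ∀ (cli_actions_list : List (List (String × List String))), Dom_convert_cli_actions_to_gym cli_actions_list → Pre_convert_cli_actions_to_gym cli_actions_list → Spec_convert_cli_actions_to_gym cli_actions_list (convert_cli_actions_to_gym cli_actions_list)

-- ===== LEMMAS AND PROOFS =====

-- a row of B's table, read back at a valid index, is its generating function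
theorem pv_getD_map_range {α : Type} (f : Nat → α) (n t : Nat) (ht : t < n) (d : α) :
    ((List.range n).map f).getD t d = f t := by
  rw [List.getD_eq_getElem _ _ (by simpa using ht)]
  simp

-- A's per-entry computation equals B's helper
theorem pv_entry_eq (ts : List String) (turn : Nat) :
    (let p_acts := ["WAIT"]
     if turn < ts.length then
       let lines := pvLinesA (ts.getD turn "")
       if lines ≠ [] then lines else p_acts
     else p_acts) = pvActsB ts turn := by
  simp only [pvActsB, pvLinesA]

-- ===== VERDICT (by name: the statement is the Claim_ definition above) =====
theorem convert_cli_actions_to_gym_spec : Claim_equal_convert_cli_actions_to_gym := by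
  intro L _ _
  unfold Spec_convert_cli_actions_to_gym convert_cli_actions_to_gym convert_cli_actions_to_gym_alt
  simp only
  refine Prod.ext rfl ?_
  apply List.map_congr_left
  intro t ht
  rw [List.mem_range] at ht
  rw [List.map_map]
  apply List.map_congr_left
  intro actions _
  rw [Function.comp_apply,
    pv_getD_map_range (fun t => [pvActsB (PySem.Dict.getD (PySem.Dict.mk actions) "0" []) t,
      pvActsB (PySem.Dict.getD (PySem.Dict.mk actions) "1" []) t]) _ t ht]
  rw [← pv_entry_eq (PySem.Dict.getD (PySem.Dict.mk actions) "0" []) t,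
      ← pv_entry_eq (PySem.Dict.getD (PySem.Dict.mk actions) "1" []) t]
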